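-- pv_equiv track=rewrite | github.com/facebookresearch/LIGHT | light/graph/builders/llm_prompt_builder.py | _drop_articles
-- ===== SOURCE A (Python) =====
-- from typing import Dict, Any, List, Optional, Tuple, TYPE_CHECKING
--
-- def _drop_articles(name_list: List[str]) -> List[str]:
--     res = []
--     for elem in name_list:
--         elem = elem.strip()
--         for article in ["a ", "an ", "the "]:
--             if elem.lower().startswith(article):
--                 elem = elem[len(article) :]
--                 break
--         res.append(elem)
--     return res
-- ===== SOURCE B (Python) =====
-- ARTICLES = {"a", "an", "the"}
--
-- def _drop_articles(name_list):
--     res = []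
--     for elem in name_list:
--         elem = elem.strip()
--         parts = elem.split(' ', 1)
--         if len(parts) == 2 and parts[0].lower() in ARTICLES:
--             elem = parts[1]
--         res.append(elem)
--     return res
-- ===== Notes on version B (the rewrite author's own statement) =====
-- stated objective: simpler
-- what changed: Replaces the inner loop over the three article prefixes (lowercase-startswith plus slice for each) with one split(' ', 1) tokenization and a single set-membership test on the first token.
import Mathlib
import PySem

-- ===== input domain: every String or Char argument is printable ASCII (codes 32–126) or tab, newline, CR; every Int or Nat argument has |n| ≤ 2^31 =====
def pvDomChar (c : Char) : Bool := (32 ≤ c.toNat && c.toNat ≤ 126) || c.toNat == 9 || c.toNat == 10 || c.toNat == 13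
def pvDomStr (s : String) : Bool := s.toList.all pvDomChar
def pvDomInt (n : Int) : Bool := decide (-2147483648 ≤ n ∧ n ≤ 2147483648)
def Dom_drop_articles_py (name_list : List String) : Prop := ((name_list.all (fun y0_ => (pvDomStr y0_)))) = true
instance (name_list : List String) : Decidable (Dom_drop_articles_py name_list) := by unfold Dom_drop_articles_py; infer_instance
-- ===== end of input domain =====

-- B replaces the inner loop over the three article prefixes with one split(' ', 1) and a set-membership test on the first token (simpler decomposition; same cost).

-- ===== PORT A =====
-- the inner `for article in ["a ", "an ", "the "]: ... break` loop is the fold over the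
-- article list carrying (current elem, broken-out-of-loop flag)
def drop_articles_py (name_list : List String) : List String :=
  name_list.foldl (fun res elem =>
    let elem := PySem.Str.strip elem
    let elem := (["a ", "an ", "the "].foldl (fun (st : String × Bool) article =>
        if st.2 then st
        else if PySem.Str.startswith (PySem.Str.lower st.1) article then
          (PySem.Str.slice st.1 (some ((PySem.Str.len article : Int))) none, true)
        else st) (elem, false)).1
    res ++ [elem]) []

-- ===== PORT B =====
-- ARTICLES = {"a", "an", "the"} (a set of distinct string literals)
def pvArticles : List String := ["a", "an", "the"]

def drop_articles_py_alt (name_list : List String) : List String :=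
  name_list.map (fun elem =>
    let elem := PySem.Str.strip elem
    match PySem.Str.splitMax? elem " " 1 with
    | some [p0, rest] => if pvArticles.contains (PySem.Str.lower p0) then rest else elem
    | _ => elem)

-- ===== PRECONDITION & SPEC =====
def Spec_drop_articles_py (name_list : List String) (out : List String) : Prop := out = drop_articles_py_alt name_list
instance (name_list : List String) (out : List String) : Decidable (Spec_drop_articles_py name_list out) := by unfold Spec_drop_articles_py; infer_instance

-- ===== CLAIM (what is proved, stated in full; the proofs are below) =====
def Claim_equal_drop_articles_py : Prop := ∀ (name_list : List String), Dom_drop_articles_py name_list → Spec_drop_articles_py name_list (drop_articles_py name_list)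

-- ===== LEMMAS AND PROOFS =====

lemma lowerChar_eq_space_iff (c : Char) : PySem.Chars.lowerChar c = ' ' ↔ c = ' ' := by
  unfold PySem.Chars.lowerChar PySem.Chars.isupper
  split_ifs with h
  · simp only [decide_eq_true_eq, Bool.and_eq_true, Char.le_def, UInt32.le_iff_toNat_le] at h
    have h1 : 65 ≤ c.toNat := h.1
    have h2 : c.toNat ≤ 90 := h.2
    have hv : (c.toNat + 32).isValidChar := Or.inl (by omega)
    constructor
    · intro hc
      have := congrArg Char.toNat hc
      rw [Char.toNat_ofNat, if_pos hv, show ' '.toNat = 32 from rfl] at this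
      omega
    · intro hc; subst hc; exact absurd h1 (by decide)
  · exact Iff.rfl

lemma go_zero (fuel : Nat) (l cur : List Char) (acc : List (List Char)) :
    PySem.Chars.splitOnMax.go [' '] fuel 0 l cur acc = ((cur.reverse ++ l) :: acc).reverse := by
  cases fuel with
  | zero => simp [PySem.Chars.splitOnMax.go]
  | succ n => cases l <;> simp [PySem.Chars.splitOnMax.go]
lemma go_one (fuel : Nat) (l cur : List Char) (acc : List (List Char)) (h : l.length < fuel) :
    PySem.Chars.splitOnMax.go [' '] fuel 1 l cur acc =
      if ' ' ∈ l then
        acc.reverse ++ [cur.reverse ++ l.takeWhile (· ≠ ' '), (l.dropWhile (· ≠ ' ')).drop 1]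
      else acc.reverse ++ [cur.reverse ++ l] := by
  induction fuel generalizing l cur acc with
  | zero => omega
  | succ n ih =>
    cases l with
    | nil => simp [PySem.Chars.splitOnMax.go]
    | cons c rest =>
      by_cases hc : c = ' '
      · subst hc
        simp [PySem.Chars.splitOnMax.go, List.isPrefixOf, go_zero]
      · have : rest.length < n := by simpa using h
        simp [PySem.Chars.splitOnMax.go, List.isPrefixOf, hc, ih rest (c :: cur) acc this]
        simp [eq_comm, hc]
lemma split_one (l : List Char) :
    PySem.Chars.splitOnMax l [' '] 1 =
      if ' ' ∈ l then [l.takeWhile (· ≠ ' '), (l.dropWhile (· ≠ ' ')).drop 1] else [l] := by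
  unfold PySem.Chars.splitOnMax
  rw [if_neg (by omega)]
  rw [show (1 : Int).toNat = 1 from rfl]
  rw [go_one (l.length + 1) l [] [] (by omega)]
  split <;> simp

def chainA (l : List Char) : List Char :=
  if ['a', ' '].isPrefixOf (l.map PySem.Chars.lowerChar) then l.drop 2
  else if ['a', 'n', ' '].isPrefixOf (l.map PySem.Chars.lowerChar) then l.drop 3
  else if ['t', 'h', 'e', ' '].isPrefixOf (l.map PySem.Chars.lowerChar) then l.drop 4
  else l

lemma chainA_no_space (l : List Char) (h : ' ' ∉ l) : chainA l = l := by
  have key : ∀ pat : List Char, ' ' ∈ pat → ¬ pat.isPrefixOf (l.map PySem.Chars.lowerChar) := by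
    intro pat hpat hpre
    rw [List.isPrefixOf_iff_prefix] at hpre
    have : ' ' ∈ l.map PySem.Chars.lowerChar := hpre.subset hpat
    obtain ⟨c, hc, hlc⟩ := List.mem_map.mp this
    exact h ((lowerChar_eq_space_iff c).mp hlc ▸ hc)
  unfold chainA
  rw [if_neg (key _ (by simp)), if_neg (key _ (by simp)), if_neg (key _ (by simp))]

lemma chainA_append (p t : List Char) (hp : ∀ c ∈ p, c ≠ ' ') :
    chainA (p ++ ' ' :: t) =
      if p.map PySem.Chars.lowerChar ∈ [['a'], ['a', 'n'], ['t', 'h', 'e']] then t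
      else p ++ ' ' :: t := by
  have hlp : ∀ c ∈ p, PySem.Chars.lowerChar c ≠ ' ' := by
    intro c hc hlc
    exact hp c hc ((lowerChar_eq_space_iff c).mp hlc)
  have hsp : PySem.Chars.lowerChar ' ' = ' ' := rfl
  unfold chainA
  match p, hp, hlp with
  | [], _, _ => simp [List.isPrefixOf, hsp]
  | [c0], hp, hlp =>
    simp only [List.map, List.map_append, List.map_cons, List.map_nil, List.cons_append,
      List.nil_append, List.isPrefixOf, hsp]
    have h0 := hlp c0 (by simp)
    by_cases h : PySem.Chars.lowerChar c0 = 'a' <;>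
      simp_all [List.isPrefixOf, beq_iff_eq, @eq_comm Char]
  | [c0, c1], hp, hlp =>
    have h0 := hlp c0 (by simp)
    have h1 := hlp c1 (by simp)
    simp only [List.map, List.map_append, List.map_cons, List.map_nil, List.cons_append,
      List.nil_append, List.isPrefixOf, hsp]
    by_cases ha : PySem.Chars.lowerChar c0 = 'a' <;>
      by_cases hn : PySem.Chars.lowerChar c1 = 'n' <;>
        by_cases ht : PySem.Chars.lowerChar c0 = 't' <;>
          by_cases hh : PySem.Chars.lowerChar c1 = 'h' <;>
            simp_all [List.isPrefixOf, beq_iff_eq, @eq_comm Char]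
  | [c0, c1, c2], hp, hlp =>
    have h0 := hlp c0 (by simp)
    have h1 := hlp c1 (by simp)
    have h2 := hlp c2 (by simp)
    simp only [List.map, List.map_append, List.map_cons, List.map_nil, List.cons_append,
      List.nil_append, List.isPrefixOf, hsp]
    by_cases ht : PySem.Chars.lowerChar c0 = 't' <;>
      by_cases hh : PySem.Chars.lowerChar c1 = 'h' <;>
        by_cases he : PySem.Chars.lowerChar c2 = 'e' <;>
          simp_all [List.isPrefixOf, beq_iff_eq, @eq_comm Char]
  | c0 :: c1 :: c2 :: c3 :: rest, hp, hlp =>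
    have h1 := hlp c1 (by simp)
    have h2 := hlp c2 (by simp)
    have h3 := hlp c3 (by simp)
    simp_all [List.isPrefixOf, beq_iff_eq, @eq_comm Char]
lemma foldArticles_eq (t : String) :
    (["a ", "an ", "the "].foldl (fun (st : String × Bool) article =>
        if st.2 then st
        else if PySem.Str.startswith (PySem.Str.lower st.1) article then
          (PySem.Str.slice st.1 (some ((PySem.Str.len article : Int))) none, true)
        else st) (t, false)).1 = String.ofList (chainA t.toList) := by
  simp only [List.foldl_cons, List.foldl_nil]
  unfold chainA
  simp only [PySem.Str.startswith_eq, PySem.Str.toList_lower, PySem.Chars.startswith,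
    PySem.Chars.lower, Bool.false_eq_true, if_false]
  split_ifs <;>
    simp_all [PySem.Str.slice, PySem.Str.len, PySem.List.slice_from,
      show ("a ").toList = ['a', ' '] from rfl, show ("an ").toList = ['a', 'n', ' '] from rfl,
      show ("the ").toList = ['t', 'h', 'e', ' '] from rfl]

lemma dropWhile_head_space (l : List Char) (h : ' ' ∈ l) :
    l.dropWhile (· ≠ ' ') = ' ' :: (l.dropWhile (· ≠ ' ')).tail := by
  induction l with
  | nil => simp at h
  | cons c rest ih =>
    by_cases hc : c = ' '
    · subst hc; simp
    · have hr : ' ' ∈ rest := by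
        rcases List.mem_cons.mp h with h1 | h1
        · exact absurd h1.symm hc
        · exact h1
      simp only [List.dropWhile_cons]
      rw [if_pos (by simpa using hc)]
      exact ih hr

lemma cond_iff (p : List Char) :
    (pvArticles.contains (PySem.Str.lower (String.ofList p)) = true) ↔
      (p.map PySem.Chars.lowerChar ∈ [['a'], ['a', 'n'], ['t', 'h', 'e']]) := by
  have hl : (PySem.Str.lower (String.ofList p)).toList = p.map PySem.Chars.lowerChar := by
    simp [PySem.Chars.lower]
  rw [List.contains_iff_mem]
  simp only [List.mem_cons, List.not_mem_nil, or_false, pvArticles]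
  constructor
  · rintro (h | h | h)
    · left; rw [← hl, h]; rfl
    · right; left; rw [← hl, h]; rfl
    · right; right; rw [← hl, h]; rfl
  · rintro (h | h | h)
    · left; rw [← String.toList_inj, hl, h]; rfl
    · right; left; rw [← String.toList_inj, hl, h]; rfl
    · right; right; rw [← String.toList_inj, hl, h]; rfl

lemma pB_eq (t : String) :
    (match PySem.Str.splitMax? t " " 1 with
     | some [p0, rest] => if pvArticles.contains (PySem.Str.lower p0) then rest else t
     | _ => t) = String.ofList (chainA t.toList) := by
  have hsplit : PySem.Str.splitMax? t " " 1 =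
      some ((PySem.Chars.splitOnMax t.toList [' '] 1).map String.ofList) := by
    simp [PySem.Str.splitMax?, PySem.Chars.splitMax?, show (" ").toList = [' '] from rfl]
  rw [hsplit, split_one]
  by_cases hmem : ' ' ∈ t.toList
  · rw [if_pos hmem]
    have hdw := dropWhile_head_space t.toList hmem
    have hdecomp : t.toList =
        t.toList.takeWhile (· ≠ ' ') ++ ' ' :: (t.toList.dropWhile (· ≠ ' ')).tail := by
      rw [← hdw]
      exact List.takeWhile_append_dropWhile.symm
    have hp : ∀ c ∈ t.toList.takeWhile (· ≠ ' '), c ≠ ' ' := by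
      intro c hc
      simpa using List.mem_takeWhile_imp hc
    have hdrop : (t.toList.dropWhile (· ≠ ' ')).drop 1 = (t.toList.dropWhile (· ≠ ' ')).tail := by
      cases t.toList.dropWhile (· ≠ ' ') <;> simp
    show (if pvArticles.contains (PySem.Str.lower (String.ofList (t.toList.takeWhile (· ≠ ' ')))) = true
          then String.ofList ((t.toList.dropWhile (· ≠ ' ')).drop 1) else t) =
        String.ofList (chainA t.toList)
    conv_rhs => rw [hdecomp]
    rw [chainA_append _ _ hp, hdrop]
    by_cases h : (t.toList.takeWhile (· ≠ ' ')).map PySem.Chars.lowerChar ∈ [['a'], ['a', 'n'], ['t', 'h', 'e']]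
    · rw [if_pos ((cond_iff _).mpr h), if_pos h]
    · rw [if_neg (fun hh => h ((cond_iff _).mp hh)), if_neg h, ← hdecomp]
      simp
  · rw [if_neg hmem, chainA_no_space _ hmem]
    simp

-- the per-element computation of port A (strip, then the article fold)
def pvElemA (elem : String) : String :=
  (["a ", "an ", "the "].foldl (fun (st : String × Bool) article =>
      if st.2 then st
      else if PySem.Str.startswith (PySem.Str.lower st.1) article then
        (PySem.Str.slice st.1 (some ((PySem.Str.len article : Int))) none, true)
      else st) (PySem.Str.strip elem, false)).1

-- the per-element computation of port B (strip, then split-and-test)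
def pvElemB (elem : String) : String :=
  match PySem.Str.splitMax? (PySem.Str.strip elem) " " 1 with
  | some [p0, rest] => if pvArticles.contains (PySem.Str.lower p0) then rest else PySem.Str.strip elem
  | _ => PySem.Str.strip elem

lemma pvElemA_eq_pvElemB (elem : String) : pvElemA elem = pvElemB elem :=
  (foldArticles_eq (PySem.Str.strip elem)).trans (pB_eq (PySem.Str.strip elem)).symm

lemma foldl_append_map {α β : Type} (f : α → β) (xs : List α) (acc : List β) :
    xs.foldl (fun res e => res ++ [f e]) acc = acc ++ xs.map f := by
  induction xs generalizing acc with
  | nil => simp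
  | cons x xs ih => simp [ih]

-- ===== VERDICT (by name: the statement is the Claim_ definition above) =====
theorem drop_articles_py_spec : Claim_equal_drop_articles_py := by
  intro name_list _
  unfold Spec_drop_articles_py
  show name_list.foldl (fun res e => res ++ [pvElemA e]) [] = name_list.map pvElemB
  rw [foldl_append_map, funext pvElemA_eq_pvElemB]
  rfl
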